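-- pv_equiv track=rewrite | github.com/Datus-ai/Datus-agent | datus/tools/mcp_tools/intelligent_tool_selector.py | _get_semantic_recommendations
-- ===== SOURCE A (Python) =====
-- from typing import Dict, List, Optional, Set
--
-- def _get_semantic_recommendations(user_message: str, available_tools: List[Dict]) -> List[str]:
--     """Get recommendations based on semantic similarity with tool descriptions."""
--     recommendations = []
--
--     # Simple semantic matching based on description similarity
--     message_words = set(user_message.lower().split())
--
--     for tool in available_tools:
--         if isinstance(tool, dict):
--             tool_name = tool.get("name", "")
--             tool_description = tool.get("description", "").lower()
--
--             # Calculate simple word overlap score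
--             description_words = set(tool_description.split())
--             overlap_score = len(message_words.intersection(description_words))
--
--             if overlap_score > 0:
--                 recommendations.append((tool_name, overlap_score))
--
--     # Sort by overlap score and return tool names
--     recommendations.sort(key=lambda x: x[1], reverse=True)
--     return [tool_name for tool_name, _ in recommendations]
-- ===== SOURCE B (Python) =====
-- from typing import Dict, List
--
--
-- def _get_semantic_recommendations(user_message: str, available_tools: List[Dict]) -> List[str]:
--     """Bucket tools by overlap score (counting sort) instead of comparison-sorting pairs."""
--     message_words = set(user_message.lower().split())
--
--     buckets = {}
--     max_score = 0
--     for tool in available_tools: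
--         if isinstance(tool, dict):
--             tool_name = tool.get("name", "")
--             description_words = set(tool.get("description", "").lower().split())
--             overlap_score = len(message_words.intersection(description_words))
--             if overlap_score > 0:
--                 buckets.setdefault(overlap_score, []).append(tool_name)
--                 if overlap_score > max_score:
--                     max_score = overlap_score
--
--     result = []
--     for score in range(max_score, 0, -1):
--         result.extend(buckets.get(score, []))
--     return result
-- ===== Notes on version B (the rewrite author's own statement) =====
-- stated objective: alternative
-- what changed: The scoring pass is kept, but instead of collecting (name, score) pairs and comparison-sorting them in reverse, B appends each qualifying tool name to a per-score bucket dict while tracking the maximum score, then concatenates the buckets from the maximum score down to 1 (a counting/bucket sort that preserves the stable tie order).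
import Mathlib
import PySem

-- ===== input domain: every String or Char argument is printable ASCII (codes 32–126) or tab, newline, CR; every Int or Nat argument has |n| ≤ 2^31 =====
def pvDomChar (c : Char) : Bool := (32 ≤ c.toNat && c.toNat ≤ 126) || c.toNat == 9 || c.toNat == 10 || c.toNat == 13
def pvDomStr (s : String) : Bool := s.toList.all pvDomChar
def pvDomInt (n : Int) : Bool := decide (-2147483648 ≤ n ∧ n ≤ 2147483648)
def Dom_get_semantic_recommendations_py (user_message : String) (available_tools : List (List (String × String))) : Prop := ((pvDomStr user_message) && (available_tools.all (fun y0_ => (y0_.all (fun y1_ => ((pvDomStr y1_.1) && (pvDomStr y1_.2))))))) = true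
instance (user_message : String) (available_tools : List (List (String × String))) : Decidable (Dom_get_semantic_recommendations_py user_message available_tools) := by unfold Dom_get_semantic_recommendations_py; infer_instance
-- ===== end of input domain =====

-- B replaces A's comparison sort of (name, score) pairs by a counting/bucket sort over
-- the integer scores, concatenating buckets from the maximum score down to 1
-- (objective: alternative; same observable result).

-- ===== PORT A =====
def get_semantic_recommendations_py (user_message : String) (available_tools : List (List (String × String))) : List String :=
  let message_words : PySem.Set String := PySem.Set.ofList (PySem.Str.split₀ (PySem.Str.lower user_message))
  let recommendations : List (String × Int) :=
    available_tools.foldl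
      (fun recommendations tool =>
        let tool_name : String := PySem.Dict.getD ⟨tool⟩ "name" ""
        let tool_description : String := PySem.Str.lower (PySem.Dict.getD ⟨tool⟩ "description" "")
        let description_words : PySem.Set String := PySem.Set.ofList (PySem.Str.split₀ tool_description)
        let overlap_score : Int := ((PySem.Set.inter message_words description_words).length : Int)
        if 0 < overlap_score then recommendations ++ [(tool_name, overlap_score)] else recommendations)
      []
  -- recommendations.sort(key=lambda x: x[1], reverse=True); return [name for name, _ in recommendations]
  (PySem.List.sorted recommendations (fun x => x.2) true).map (fun x => x.1)

-- ===== PORT B =====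
def get_semantic_recommendations_py_alt (user_message : String) (available_tools : List (List (String × String))) : List String :=
  let message_words : PySem.Set String := PySem.Set.ofList (PySem.Str.split₀ (PySem.Str.lower user_message))
  -- state: (buckets : score ↦ names appended in traversal order, max_score)
  let st : PySem.Dict Int (List String) × Int :=
    available_tools.foldl
      (fun st tool =>
        let tool_name : String := PySem.Dict.getD ⟨tool⟩ "name" ""
        let description_words : PySem.Set String :=
          PySem.Set.ofList (PySem.Str.split₀ (PySem.Str.lower (PySem.Dict.getD ⟨tool⟩ "description" "")))
        let overlap_score : Int := ((PySem.Set.inter message_words description_words).length : Int)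
        if 0 < overlap_score then
          (st.1.modify overlap_score [] (fun b => b ++ [tool_name]),   -- buckets.setdefault(s, []).append(name)
           if st.2 < overlap_score then overlap_score else st.2)
        else st)
      (PySem.Dict.mk [], 0)
  -- for score in range(max_score, 0, -1): result.extend(buckets.get(score, []))
  (PySem.List.pyRange st.2 0 (-1)).foldl (fun result score => result ++ st.1.getD score []) []

-- ===== PRECONDITION & SPEC =====
def Spec_get_semantic_recommendations_py (user_message : String) (available_tools : List (List (String × String))) (out : List String) : Prop := out = get_semantic_recommendations_py_alt user_message available_tools
instance (user_message : String) (available_tools : List (List (String × String))) (out : List String) : Decidable (Spec_get_semantic_recommendations_py user_message available_tools out) := by unfold Spec_get_semantic_recommendations_py; infer_instance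

-- ===== CLAIM (what is proved, stated in full; the proofs are below) =====
def Claim_equal_get_semantic_recommendations_py : Prop := ∀ (user_message : String) (available_tools : List (List (String × String))), Dom_get_semantic_recommendations_py user_message available_tools → Spec_get_semantic_recommendations_py user_message available_tools (get_semantic_recommendations_py user_message available_tools)

-- ===== LEMMAS AND PROOFS =====

-- the per-tool name and overlap score both ports compute
def pvNm (tool : List (String × String)) : String := PySem.Dict.getD ⟨tool⟩ "name" ""
def pvSc (mw : PySem.Set String) (tool : List (String × String)) : Int :=
  ((PySem.Set.inter mw (PySem.Set.ofList (PySem.Str.split₀ (PySem.Str.lower (PySem.Dict.getD ⟨tool⟩ "description" ""))))).length : Int)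

-- inserting behind a block the element never goes before
theorem insertBy_append_left {α : Type} (before : α → α → Bool) (x : α) (as bs : List α)
    (h : ∀ y ∈ as, before x y = false) :
    PySem.List.insertBy before x (as ++ bs) = as ++ PySem.List.insertBy before x bs := by
  induction as with
  | nil => simp
  | cons a as ih =>
    simp only [List.cons_append, PySem.List.insertBy, h a (by simp)]
    simp only [Bool.false_eq_true, if_false, List.cons.injEq, true_and]
    exact ih (fun y hy => h y (by simp [hy]))

-- inserting in front of a block it goes before everywhere
theorem insertBy_cons_of_all {α : Type} (before : α → α → Bool) (x : α) (ys : List α)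
    (h : ∀ y ∈ ys, before x y = true) :
    PySem.List.insertBy before x ys = x :: ys := by
  cases ys with
  | nil => rfl
  | cons y ys => simp [PySem.List.insertBy, h y (by simp)]

theorem flatMap_congr_mem {α β : Type} (l : List α) (g g' : α → List β)
    (h : ∀ t ∈ l, g t = g' t) : l.flatMap g = l.flatMap g' := by
  induction l with
  | nil => rfl
  | cons a l ih => simp [List.flatMap_cons, h a (by simp), ih (fun t ht => h t (by simp [ht]))]

-- one stable descending insertion lands at the end of its own bucket
theorem insertBy_buckets (ss : List Int) (hss : ss.Pairwise (fun a b => b < a))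
    (l : List (String × Int)) (x : String × Int) (hx : x.2 ∈ ss) :
    PySem.List.insertBy (fun a b => decide (b.2 < a.2)) x
      (ss.flatMap (fun s => l.filter (fun p => p.2 == s)))
    = ss.flatMap (fun s => (l ++ [x]).filter (fun p => p.2 == s)) := by
  induction ss generalizing l with
  | nil => simp at hx
  | cons s ss ih =>
    have hlt : ∀ t ∈ ss, t < s := (List.pairwise_cons.mp hss).1
    have hss' := (List.pairwise_cons.mp hss).2
    simp only [List.flatMap_cons]
    by_cases hxs : x.2 = s
    · rw [insertBy_append_left _ _ _ _ (by
        intro y hy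
        have : y.2 = s := by simpa using (List.of_mem_filter hy)
        simp [this, hxs])]
      rw [insertBy_cons_of_all _ _ _ (by
        intro y hy
        simp only [List.mem_flatMap] at hy
        obtain ⟨t, ht, hyf⟩ := hy
        have : y.2 = t := by simpa using (List.of_mem_filter hyf)
        simp only [decide_eq_true_eq, this, hxs]
        exact hlt t ht)]
      have h1 : (l ++ [x]).filter (fun p => p.2 == s) = l.filter (fun p => p.2 == s) ++ [x] := by
        simp [List.filter_append, hxs]
      have h2 : ss.flatMap (fun t => (l ++ [x]).filter (fun p => p.2 == t))
          = ss.flatMap (fun t => l.filter (fun p => p.2 == t)) := by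
        apply flatMap_congr_mem
        intro t ht
        have hne : ¬ (x.2 = t) := by have := hlt t ht; omega
        simp [List.filter_append, hne]
      rw [h1, h2]
      simp
    · have hx' : x.2 ∈ ss := by
        rcases List.mem_cons.mp hx with h | h
        · exact absurd h hxs
        · exact h
      rw [insertBy_append_left _ _ _ _ (by
        intro y hy
        have hy2 : y.2 = s := by simpa using (List.of_mem_filter hy)
        have : x.2 < s := hlt _ hx'
        simp only [decide_eq_false_iff_not, hy2]
        omega)]
      rw [ih hss' l hx']
      have h1 : (l ++ [x]).filter (fun p => p.2 == s) = l.filter (fun p => p.2 == s) := by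
        simp [List.filter_append, hxs]
      rw [h1]

-- the whole stable insertion fold fills the buckets
theorem foldl_insertBy_buckets (ss : List Int) (hss : ss.Pairwise (fun a b => b < a))
    (l rest : List (String × Int)) (hrest : ∀ p ∈ rest, p.2 ∈ ss) :
    rest.foldl (fun acc x => PySem.List.insertBy (fun a b => decide (b.2 < a.2)) x acc)
      (ss.flatMap (fun s => l.filter (fun p => p.2 == s)))
    = ss.flatMap (fun s => (l ++ rest).filter (fun p => p.2 == s)) := by
  induction rest generalizing l with
  | nil => simp
  | cons r rest ih =>
    simp only [List.foldl_cons]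
    rw [insertBy_buckets ss hss l r (hrest r (by simp))]
    rw [ih (l ++ [r]) (fun p hp => hrest p (by simp [hp]))]
    simp

-- sorted(recs, key=snd, reverse=True) is the concatenation of the score buckets, high to low
theorem sorted_rev_eq_buckets (M : Int) (recs : List (String × Int))
    (h : ∀ p ∈ recs, 0 < p.2 ∧ p.2 ≤ M) :
    PySem.List.sorted recs (fun x => x.2) true
    = (PySem.List.pyRange M 0 (-1)).flatMap (fun s => recs.filter (fun p => p.2 == s)) := by
  have hss : (PySem.List.pyRange M 0 (-1)).Pairwise (fun a b => b < a) := by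
    rw [PySem.List.pyRange_neg_one]
    exact List.Pairwise.map _ (fun {k k'} hkk => by omega) (List.pairwise_lt_range)
  have hmem : ∀ p ∈ recs, p.2 ∈ PySem.List.pyRange M 0 (-1) := by
    intro p hp
    rw [PySem.List.mem_pyRange_iff_of_neg (by norm_num)]
    exact ⟨(h p hp).1, (h p hp).2, ⟨-(p.2 - M), by ring⟩⟩
  rw [PySem.List.sorted_rev_eq_foldl_insertBy]
  have := foldl_insertBy_buckets _ hss [] recs hmem
  simp only [List.filter_nil] at this
  rw [show (PySem.List.pyRange M 0 (-1)).flatMap (fun _ => ([] : List (String × Int))) = [] from by simp] at this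
  simpa using this

-- B's folded state: the buckets dict and the running maximum, in closed form
theorem B_state (mw : PySem.Set String) (tools : List (List (String × String)))
    (d : PySem.Dict Int (List String)) (m : Int) :
    tools.foldl
      (fun st tool =>
        if 0 < pvSc mw tool then
          (st.1.modify (pvSc mw tool) [] (fun b => b ++ [pvNm tool]),
           if st.2 < pvSc mw tool then pvSc mw tool else st.2)
        else st) (d, m)
    = (((tools.filter (fun t => decide (0 < pvSc mw t))).map (fun t => (pvSc mw t, pvNm t))).foldl
         (fun d p => d.modify p.1 [] (fun b => b ++ [p.2])) d,
       ((tools.filter (fun t => decide (0 < pvSc mw t))).map (fun t => (pvSc mw t, pvNm t))).foldl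
         (fun m p => if m < p.1 then p.1 else m) m) := by
  induction tools generalizing d m with
  | nil => simp
  | cons t ts ih =>
    by_cases ht : 0 < pvSc mw t
    · simp only [List.foldl_cons, List.filter_cons, ht, decide_true, if_true, List.map_cons]
      exact ih _ _
    · simp only [List.foldl_cons, List.filter_cons, ht, decide_false, if_false]
      exact ih _ _

-- the if-chain in B is foldl max
theorem foldl_if_max (l : List (Int × String)) (m : Int) :
    l.foldl (fun m p => if m < p.1 then p.1 else m) m = (l.map (fun p => p.1)).foldl max m := by
  rw [List.foldl_map]
  congr 1
  funext a b
  rw [max_def]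
  split_ifs <;> omega

-- ===== VERDICT (by name: the statement is the Claim_ definition above) =====
theorem get_semantic_recommendations_py_spec : Claim_equal_get_semantic_recommendations_py := by
  intro user_message available_tools _hdom
  unfold Spec_get_semantic_recommendations_py get_semantic_recommendations_py get_semantic_recommendations_py_alt
  simp only []
  set mw : PySem.Set String := PySem.Set.ofList (PySem.Str.split₀ (PySem.Str.lower user_message)) with hmw
  -- name both loops in terms of pvNm / pvSc
  have hA : available_tools.foldl
      (fun recommendations tool =>
        let tool_name : String := PySem.Dict.getD ⟨tool⟩ "name" ""
        let tool_description : String := PySem.Str.lower (PySem.Dict.getD ⟨tool⟩ "description" "")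
        let description_words : PySem.Set String := PySem.Set.ofList (PySem.Str.split₀ tool_description)
        let overlap_score : Int := ((PySem.Set.inter mw description_words).length : Int)
        if 0 < overlap_score then recommendations ++ [(tool_name, overlap_score)] else recommendations)
      []
      = (available_tools.filter (fun t => decide (0 < pvSc mw t))).map (fun t => (pvNm t, pvSc mw t)) := by
    have : (fun (recommendations : List (String × Int)) tool =>
        let tool_name : String := PySem.Dict.getD ⟨tool⟩ "name" ""
        let tool_description : String := PySem.Str.lower (PySem.Dict.getD ⟨tool⟩ "description" "")
        let description_words : PySem.Set String := PySem.Set.ofList (PySem.Str.split₀ tool_description)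
        let overlap_score : Int := ((PySem.Set.inter mw description_words).length : Int)
        if 0 < overlap_score then recommendations ++ [(tool_name, overlap_score)] else recommendations)
        = (fun acc t => if (fun t => decide (0 < pvSc mw t)) t = true
            then acc ++ [(fun t => (pvNm t, pvSc mw t)) t] else acc) := by
      funext acc t
      simp [pvSc, pvNm]
    rw [this, PySem.List.foldl_append_if]
    simp
  have hBfun : (fun (st : PySem.Dict Int (List String) × Int) tool =>
        let tool_name : String := PySem.Dict.getD ⟨tool⟩ "name" ""
        let description_words : PySem.Set String :=
          PySem.Set.ofList (PySem.Str.split₀ (PySem.Str.lower (PySem.Dict.getD ⟨tool⟩ "description" "")))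
        let overlap_score : Int := ((PySem.Set.inter mw description_words).length : Int)
        if 0 < overlap_score then
          (st.1.modify overlap_score [] (fun b => b ++ [tool_name]),
           if st.2 < overlap_score then overlap_score else st.2)
        else st)
      = (fun st tool =>
        if 0 < pvSc mw tool then
          (st.1.modify (pvSc mw tool) [] (fun b => b ++ [pvNm tool]),
           if st.2 < pvSc mw tool then pvSc mw tool else st.2)
        else st) := by
    funext st t
    dsimp only [pvSc, pvNm]
    rfl
  rw [hA, hBfun, B_state]
  set tf := available_tools.filter (fun t => decide (0 < pvSc mw t)) with htf
  set recs := tf.map (fun t => (pvNm t, pvSc mw t)) with hrecs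
  set qs := tf.map (fun t => (pvSc mw t, pvNm t)) with hqs
  rw [foldl_if_max, PySem.List.foldl_append_eq_flatMap]
  have hmax := PySem.List.le_foldl_max (qs.map (fun p => p.1)) 0
  set M := (qs.map (fun p => p.1)).foldl max 0 with hM
  have hget : ∀ s : Int,
      (qs.foldl (fun d p => d.modify p.1 [] (fun b => b ++ [p.2])) (PySem.Dict.mk [])).getD s []
      = (qs.filter (fun p => p.1 == s)).map (fun p => p.2) := by
    intro s
    have := PySem.Dict.getD_foldl_modify_append qs (PySem.Dict.mk []) s
    simpa [PySem.Dict.getD, PySem.Dict.get?] using this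
  have hcond : ∀ p ∈ recs, 0 < p.2 ∧ p.2 ≤ M := by
    intro p hp
    rw [hrecs] at hp
    obtain ⟨t, ht, rfl⟩ := List.mem_map.mp hp
    refine ⟨by simpa using (List.of_mem_filter ht), ?_⟩
    exact hmax.2 _ (by
      rw [hqs]
      simp only [List.map_map, List.mem_map]
      exact ⟨t, ht, rfl⟩)
  rw [sorted_rev_eq_buckets M recs hcond, List.map_flatMap]
  simp only [List.nil_append]
  apply flatMap_congr_mem
  intro s _
  rw [hget, hrecs, hqs]
  simp [List.filter_map, List.map_map, Function.comp_def]
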